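-- pv_equiv track=rewrite | github.com/KIRUBAKARAN9840/fittbot | food_template.py | validate_diet_compliance
-- ===== SOURCE A (Python) =====
-- def get_diet_specific_restrictions(diet_type):
--     """Get specific food restrictions and guidelines for each diet type"""
--
--     restrictions = {
--         "vegetarian": {
--             "avoid": ["meat", "chicken", "fish", "beef", "mutton", "pork", "seafood", "eggs"],
--             "allow": ["dairy", "milk", "paneer", "ghee", "vegetables", "grains", "legumes", "fruits"],
--             "special_notes": "No meat, fish, or eggs. Dairy products allowed."
--         },
--
--         "non-vegetarian": {
--             "avoid": [],
--             "allow": ["meat", "chicken", "fish", "eggs", "dairy", "vegetables", "grains", "legumes"],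
--             "special_notes": "All foods allowed including meat, fish, eggs, and dairy."
--         },
--
--         "eggetarian": {
--             "avoid": ["meat", "chicken", "fish", "beef", "mutton", "pork", "seafood"],
--             "allow": ["eggs", "dairy", "milk", "paneer", "ghee", "vegetables", "grains", "legumes"],
--             "special_notes": "Vegetarian diet that includes eggs and dairy products."
--         },
--
--         "vegan": {
--             "avoid": ["meat", "chicken", "fish", "eggs", "dairy", "milk", "paneer", "ghee", "butter", "curd", "cheese", "honey"],
--             "allow": ["vegetables", "fruits", "grains", "legumes", "nuts", "seeds", "plant-based milk"],
--             "special_notes": "Strictly plant-based. No animal products including dairy, eggs, or honey."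
--         },
--
--         "jain": {
--             "avoid": ["meat", "fish", "eggs", "onion", "garlic", "potato", "carrot", "radish", "beetroot",
--                      "ginger", "turmeric", "mushrooms", "yeast", "alcohol", "root vegetables", "underground vegetables"],
--             "allow": ["dairy", "milk", "paneer", "above-ground vegetables", "fruits", "grains", "legumes"],
--             "special_notes": "Vegetarian diet avoiding all root/underground vegetables, onion, garlic. No violence to plants with multiple lives."
--         },
--
--         "ketogenic": {
--             "avoid": ["rice", "wheat", "bread", "roti", "chapati", "potato", "banana", "mango", "grapes",
--                      "sugar", "honey", "jaggery", "high-carb fruits", "legumes", "beans", "lentils"],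
--             "allow": ["meat", "fish", "eggs", "cheese", "butter", "ghee", "coconut oil", "avocado",
--                      "leafy greens", "cauliflower", "broccoli", "nuts", "seeds"],
--             "special_notes": "Very low carb (under 20g/day), high fat, moderate protein. Focus on ketosis."
--         },
--
--         "paleo": {
--             "avoid": ["grains", "rice", "wheat", "legumes", "dairy", "processed foods", "sugar",
--                      "artificial sweeteners", "vegetable oils", "beans", "lentils", "peanuts"],
--             "allow": ["meat", "fish", "eggs", "vegetables", "fruits", "nuts", "seeds", "coconut", "olive oil"],
--             "special_notes": "Foods available to paleolithic humans. No grains, legumes, or dairy."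
--         }
--     }
--
--     return restrictions.get(diet_type, restrictions["vegetarian"])
--
-- def validate_diet_compliance(meal_data, diet_type):
--     """Validate if meal plan complies with diet restrictions"""
--     restrictions = get_diet_specific_restrictions(diet_type)
--     avoid_foods = [food.lower() for food in restrictions['avoid']]
--
--     for meal_slot in meal_data.get("meals", []):
--         for food in meal_slot.get("foods", []):
--             food_name = food.get("name", "").lower()
--             for avoided_food in avoid_foods:
--                 if avoided_food in food_name:
--                     return False
--     return True
-- ===== SOURCE B (Python) =====
-- # Alternative strategy: one hard-coded avoid-word table, a first-character dispatch
-- # dictionary built once, and a single position scan per (lowercased) food name with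
-- # startswith checks only for words sharing that first character.
--
-- _AVOID = {
--     "vegetarian": ["meat", "chicken", "fish", "beef", "mutton", "pork", "seafood", "eggs"],
--     "non-vegetarian": [],
--     "eggetarian": ["meat", "chicken", "fish", "beef", "mutton", "pork", "seafood"],
--     "vegan": ["meat", "chicken", "fish", "eggs", "dairy", "milk", "paneer", "ghee", "butter",
--               "curd", "cheese", "honey"],
--     "jain": ["meat", "fish", "eggs", "onion", "garlic", "potato", "carrot", "radish", "beetroot",
--              "ginger", "turmeric", "mushrooms", "yeast", "alcohol", "root vegetables",
--              "underground vegetables"],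
--     "ketogenic": ["rice", "wheat", "bread", "roti", "chapati", "potato", "banana", "mango",
--                   "grapes", "sugar", "honey", "jaggery", "high-carb fruits", "legumes", "beans",
--                   "lentils"],
--     "paleo": ["grains", "rice", "wheat", "legumes", "dairy", "processed foods", "sugar",
--               "artificial sweeteners", "vegetable oils", "beans", "lentils", "peanuts"],
-- }
--
--
-- def validate_diet_compliance(meal_data, diet_type):
--     avoid = _AVOID.get(diet_type, _AVOID["vegetarian"])
--     if not avoid:
--         return True
--     by_first = {}
--     for w in avoid:
--         by_first.setdefault(w[0], []).append(w)
--     for meal_slot in meal_data.get("meals", []):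
--         for food in meal_slot.get("foods", []):
--             name = food.get("name", "").lower()
--             for i, ch in enumerate(name):
--                 for w in by_first.get(ch, []):
--                     if name.startswith(w, i):
--                         return False
--     return True
-- ===== Notes on version B (the rewrite author's own statement) =====
-- stated objective: alternative
-- what changed: Replaces the per-word 'substring in name' inner loop with a first-character dispatch dictionary built once from the avoid words and a single position scan per lowercased food name, running startswith only for words whose first character matches (plus an early exit when the diet has no avoid words).
import Mathlib
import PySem

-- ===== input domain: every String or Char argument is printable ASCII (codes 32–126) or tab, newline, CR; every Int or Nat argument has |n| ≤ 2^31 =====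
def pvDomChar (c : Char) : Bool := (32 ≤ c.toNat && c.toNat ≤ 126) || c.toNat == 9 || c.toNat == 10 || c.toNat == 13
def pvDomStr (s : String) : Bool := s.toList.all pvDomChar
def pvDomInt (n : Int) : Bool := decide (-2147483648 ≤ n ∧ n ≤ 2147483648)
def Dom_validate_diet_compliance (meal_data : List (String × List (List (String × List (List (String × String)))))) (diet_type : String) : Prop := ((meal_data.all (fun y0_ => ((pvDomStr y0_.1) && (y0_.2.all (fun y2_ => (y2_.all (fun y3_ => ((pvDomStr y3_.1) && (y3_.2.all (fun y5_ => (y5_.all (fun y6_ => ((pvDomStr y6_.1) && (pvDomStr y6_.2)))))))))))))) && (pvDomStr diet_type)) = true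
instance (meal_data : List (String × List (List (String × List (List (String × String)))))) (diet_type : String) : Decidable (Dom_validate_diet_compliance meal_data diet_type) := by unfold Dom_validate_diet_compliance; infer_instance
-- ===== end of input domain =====

-- B replaces A's per-word substring loop by a first-character dispatch dictionary and a
-- position scan per name (objective: alternative; same results, not measured faster).

-- ===== PORT A =====
-- restrictions table of get_diet_specific_restrictions: (avoid, allow, special_notes)
def pvRestrictionsA : PySem.Dict String (List String × List String × String) := PySem.Dict.mk [
  ("vegetarian", (["meat", "chicken", "fish", "beef", "mutton", "pork", "seafood", "eggs"],
    ["dairy", "milk", "paneer", "ghee", "vegetables", "grains", "legumes", "fruits"],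
    "No meat, fish, or eggs. Dairy products allowed.")),
  ("non-vegetarian", (([] : List String),
    ["meat", "chicken", "fish", "eggs", "dairy", "vegetables", "grains", "legumes"],
    "All foods allowed including meat, fish, eggs, and dairy.")),
  ("eggetarian", (["meat", "chicken", "fish", "beef", "mutton", "pork", "seafood"],
    ["eggs", "dairy", "milk", "paneer", "ghee", "vegetables", "grains", "legumes"],
    "Vegetarian diet that includes eggs and dairy products.")),
  ("vegan", (["meat", "chicken", "fish", "eggs", "dairy", "milk", "paneer", "ghee", "butter", "curd", "cheese", "honey"],
    ["vegetables", "fruits", "grains", "legumes", "nuts", "seeds", "plant-based milk"],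
    "Strictly plant-based. No animal products including dairy, eggs, or honey.")),
  ("jain", (["meat", "fish", "eggs", "onion", "garlic", "potato", "carrot", "radish", "beetroot",
     "ginger", "turmeric", "mushrooms", "yeast", "alcohol", "root vegetables", "underground vegetables"],
    ["dairy", "milk", "paneer", "above-ground vegetables", "fruits", "grains", "legumes"],
    "Vegetarian diet avoiding all root/underground vegetables, onion, garlic. No violence to plants with multiple lives.")),
  ("ketogenic", (["rice", "wheat", "bread", "roti", "chapati", "potato", "banana", "mango", "grapes",
     "sugar", "honey", "jaggery", "high-carb fruits", "legumes", "beans", "lentils"],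
    ["meat", "fish", "eggs", "cheese", "butter", "ghee", "coconut oil", "avocado",
     "leafy greens", "cauliflower", "broccoli", "nuts", "seeds"],
    "Very low carb (under 20g/day), high fat, moderate protein. Focus on ketosis.")),
  ("paleo", (["grains", "rice", "wheat", "legumes", "dairy", "processed foods", "sugar",
     "artificial sweeteners", "vegetable oils", "beans", "lentils", "peanuts"],
    ["meat", "fish", "eggs", "vegetables", "fruits", "nuts", "seeds", "coconut", "olive oil"],
    "Foods available to paleolithic humans. No grains, legumes, or dairy."))]

-- restrictions.get(diet_type, restrictions["vegetarian"]); the "vegetarian" key is present,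
-- so the inner getD default (never reached) is the dummy ([], [], "")
def get_diet_specific_restrictions (diet_type : String) : List String × List String × String :=
  pvRestrictionsA.getD diet_type (pvRestrictionsA.getD "vegetarian" ([], [], ""))

def validate_diet_compliance (meal_data : List (String × List (List (String × List (List (String × String)))))) (diet_type : String) : Bool :=
  let restrictions := get_diet_specific_restrictions diet_type
  let avoid_foods := restrictions.1.map PySem.Str.lower
  -- nested for-loops with 'return False' on the first hit, else 'return True'
  ((PySem.Dict.mk meal_data).getD "meals" []).all fun meal_slot =>
    ((PySem.Dict.mk meal_slot).getD "foods" []).all fun food =>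
      let food_name := PySem.Str.lower ((PySem.Dict.mk food).getD "name" "")
      avoid_foods.all fun avoided_food => !(PySem.Str.isIn avoided_food food_name)

-- ===== PORT B =====
def pvAvoidB : PySem.Dict String (List String) := PySem.Dict.mk [
  ("vegetarian", ["meat", "chicken", "fish", "beef", "mutton", "pork", "seafood", "eggs"]),
  ("non-vegetarian", []),
  ("eggetarian", ["meat", "chicken", "fish", "beef", "mutton", "pork", "seafood"]),
  ("vegan", ["meat", "chicken", "fish", "eggs", "dairy", "milk", "paneer", "ghee", "butter", "curd", "cheese", "honey"]),
  ("jain", ["meat", "fish", "eggs", "onion", "garlic", "potato", "carrot", "radish", "beetroot",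
     "ginger", "turmeric", "mushrooms", "yeast", "alcohol", "root vegetables", "underground vegetables"]),
  ("ketogenic", ["rice", "wheat", "bread", "roti", "chapati", "potato", "banana", "mango", "grapes",
     "sugar", "honey", "jaggery", "high-carb fruits", "legumes", "beans", "lentils"]),
  ("paleo", ["grains", "rice", "wheat", "legumes", "dairy", "processed foods", "sugar",
     "artificial sweeteners", "vegetable oils", "beans", "lentils", "peanuts"])]

-- by_first.setdefault(w[0], []).append(w); w[0] is total here (every table word is
-- nonempty), so the headD default is never read
def pvByFirst (avoid : List String) : PySem.Dict Char (List String) :=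
  avoid.foldl (fun d w => d.insert (w.toList.headD ' ') (d.getD (w.toList.headD ' ') [] ++ [w])) (PySem.Dict.mk [])

def validate_diet_compliance_alt (meal_data : List (String × List (List (String × List (List (String × String)))))) (diet_type : String) : Bool :=
  let avoid := pvAvoidB.getD diet_type (pvAvoidB.getD "vegetarian" [])
  if avoid.isEmpty then true
  else
    let by_first := pvByFirst avoid
    ((PySem.Dict.mk meal_data).getD "meals" []).all fun meal_slot =>
      ((PySem.Dict.mk meal_slot).getD "foods" []).all fun food =>
        let name := PySem.Chars.lower ((PySem.Dict.mk food).getD "name" "").toList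
        (PySem.List.enumerate name).all fun ic =>
          (by_first.getD ic.2 []).all fun w =>
            !(PySem.Chars.startswith (name.drop ic.1.toNat) w.toList)

-- ===== PRECONDITION & SPEC =====
def Spec_validate_diet_compliance (meal_data : List (String × List (List (String × List (List (String × String)))))) (diet_type : String) (out : Bool) : Prop := out = validate_diet_compliance_alt meal_data diet_type
instance (meal_data : List (String × List (List (String × List (List (String × String)))))) (diet_type : String) (out : Bool) : Decidable (Spec_validate_diet_compliance meal_data diet_type out) := by unfold Spec_validate_diet_compliance; infer_instance

-- ===== CLAIM (what is proved, stated in full; the proofs are below) =====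
def Claim_equal_validate_diet_compliance : Prop := ∀ (meal_data : List (String × List (List (String × List (List (String × String)))))) (diet_type : String), Dom_validate_diet_compliance meal_data diet_type → Spec_validate_diet_compliance meal_data diet_type (validate_diet_compliance meal_data diet_type)

-- ===== LEMMAS AND PROOFS =====

-- getD of the first-char dispatch dict built by pvByFirst's fold = filter on the first char
theorem pvByFirst_aux : ∀ (L : List String) (d : PySem.Dict Char (List String)) (c : Char),
    (L.foldl (fun d w => d.insert (w.toList.headD ' ') (d.getD (w.toList.headD ' ') [] ++ [w])) d).getD c []
      = d.getD c [] ++ (L.filter (fun w => w.toList.headD ' ' == c)) := by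
  intro L
  induction L with
  | nil => simp
  | cons w t ih =>
    intro d c
    simp only [List.foldl_cons, List.filter_cons, ih, PySem.Dict.getD_insert, beq_iff_eq]
    split_ifs with h1 h2 <;> simp_all

theorem pvByFirst_getD (L : List String) (c : Char) :
    (pvByFirst L).getD c [] = L.filter (fun w => w.toList.headD ' ' == c) := by
  unfold pvByFirst
  rw [pvByFirst_aux]
  rfl

-- a dict whose values are f of another dict's values looks up to the mapped value
theorem get?_mk_map_snd {κ ν ν' : Type} [BEq κ] (f : ν → ν') (items : List (κ × ν)) (k : κ) :
    (PySem.Dict.mk (items.map (fun p => (p.1, f p.2)))).get? k = ((PySem.Dict.mk items).get? k).map f := by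
  induction items with
  | nil => rfl
  | cons p t ih =>
    obtain ⟨pk, pv⟩ := p
    simp only [List.map_cons, PySem.Dict.get?_mk_cons]
    by_cases h : (pk == k) = true
    · simp [h]
    · simp only [Bool.not_eq_true] at h; simp [h, ih]

theorem pvAvoidB_get? (k : String) :
    pvAvoidB.get? k = (pvRestrictionsA.get? k).map (fun e => e.1.map PySem.Str.lower) := by
  have hmap : pvAvoidB = PySem.Dict.mk (pvRestrictionsA.items.map (fun p => (p.1, p.2.1.map PySem.Str.lower))) := by decide
  rw [hmap]
  exact get?_mk_map_snd (fun e => e.1.map PySem.Str.lower) pvRestrictionsA.items k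

-- A's lowered avoid list is exactly B's table lookup
theorem avoid_eq (dt : String) :
    (get_diet_specific_restrictions dt).1.map PySem.Str.lower = pvAvoidB.getD dt (pvAvoidB.getD "vegetarian" []) := by
  unfold get_diet_specific_restrictions
  cases h : pvRestrictionsA.get? dt with
  | none => simp [PySem.Dict.getD, h, pvAvoidB_get?]; decide
  | some e => simp [PySem.Dict.getD, h, pvAvoidB_get?]

-- every avoid word of the table is nonempty
theorem avoid_nonempty (dt : String) :
    ∀ w ∈ pvAvoidB.getD dt (pvAvoidB.getD "vegetarian" []), w.toList ≠ [] := by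
  have hall : ∀ p ∈ pvAvoidB.items, ∀ w ∈ p.2, w.toList ≠ [] := by decide
  unfold PySem.Dict.getD
  cases h : pvAvoidB.get? dt with
  | none => simpa using hall ("vegetarian", _) (by decide)
  | some e =>
    simp only [Option.getD_some]
    unfold PySem.Dict.get? at h
    obtain ⟨p, hfind, hsnd⟩ := Option.map_eq_some_iff.mp h
    exact hsnd ▸ hall p (List.mem_of_find?_eq_some hfind)

theorem infix_iff_drop (w l : List Char) (hw : w ≠ []) :
    (w <:+: l) ↔ ∃ k < l.length, w <+: l.drop k := by
  constructor
  · rintro ⟨s, t, rfl⟩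
    refine ⟨s.length, ?_, by simp⟩
    cases w with
    | nil => exact absurd rfl hw
    | cons a as => simp
  · rintro ⟨k, hk, hp⟩
    exact hp.isInfix.trans (List.drop_suffix k l).isInfix

theorem head_of_prefix_drop (w l : List Char) (k : Nat) (hw : w ≠ []) (hk : k < l.length)
    (hp : w <+: l.drop k) : w.headD ' ' = l[k] := by
  obtain ⟨t, ht⟩ := hp
  have h1 : (l.drop k).head? = l[k]? := List.head?_drop
  rw [← ht] at h1
  cases w with
  | nil => exact absurd rfl hw
  | cons a as => simp [List.getElem?_eq_getElem hk] at h1; simp [h1]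

-- core: word-major substring search = position-major scan with first-char dispatch
theorem name_scan (L : List String) (hL : ∀ w ∈ L, w.toList ≠ []) (cs : List Char) :
    (L.all fun w => !(PySem.Chars.isIn w.toList cs)) =
      ((PySem.List.enumerate cs).all fun ic =>
        ((pvByFirst L).getD ic.2 []).all fun w =>
          !(PySem.Chars.startswith (cs.drop ic.1.toNat) w.toList)) := by
  have key : (∃ w ∈ L, PySem.Chars.isIn w.toList cs = true) ↔
      (∃ ic ∈ PySem.List.enumerate cs, ∃ w ∈ L.filter (fun w => w.toList.headD ' ' == ic.2),
        PySem.Chars.startswith (cs.drop ic.1.toNat) w.toList = true) := by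
    constructor
    · rintro ⟨w, hwL, hin⟩
      have hinf : w.toList <:+: cs := by
        have := PySem.Chars.find_eq_neg_one_iff cs w.toList
        simp only [PySem.Chars.isIn, bne_iff_ne, ne_eq] at hin
        exact not_not.mp (fun hn => hin (this.mpr hn))
      obtain ⟨k, hk, hp⟩ := (infix_iff_drop _ _ (hL w hwL)).mp hinf
      refine ⟨((0 : Int) + k, cs[k]), (PySem.List.mem_enumerate_iff cs 0 _).mpr ⟨k, hk, rfl⟩, w, ?_, ?_⟩
      · simp only [List.mem_filter, beq_iff_eq]
        exact ⟨hwL, head_of_prefix_drop _ _ _ (hL w hwL) hk hp⟩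
      · simp only [Int.zero_add, Int.toNat_natCast]
        exact (List.isPrefixOf_iff_prefix).mpr hp
    · rintro ⟨ic, hic, w, hwf, hsw⟩
      obtain ⟨k, hk, rfl⟩ := (PySem.List.mem_enumerate_iff cs 0 ic).mp hic
      obtain ⟨hwL, _⟩ := List.mem_filter.mp hwf
      refine ⟨w, hwL, ?_⟩
      have hp : w.toList <+: cs.drop k := by
        rw [show ((0 : Int) + (k : Int)).toNat = k by omega] at hsw
        exact (List.isPrefixOf_iff_prefix).mp hsw
      have hinf : w.toList <:+: cs := (infix_iff_drop _ _ (hL w hwL)).mpr ⟨k, hk, hp⟩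
      simp only [PySem.Chars.isIn, bne_iff_ne, ne_eq]
      exact fun hmin => ((PySem.Chars.find_eq_neg_one_iff cs w.toList).mp hmin) hinf
  have hfalse : ((L.all fun w => !(PySem.Chars.isIn w.toList cs)) = false) ↔
      (((PySem.List.enumerate cs).all fun ic =>
        ((pvByFirst L).getD ic.2 []).all fun w =>
          !(PySem.Chars.startswith (cs.drop ic.1.toNat) w.toList)) = false) := by
    simp only [List.all_eq_false, Bool.not_eq_true, Bool.not_eq_false', pvByFirst_getD]
    exact key
  cases hA : (L.all fun w => !(PySem.Chars.isIn w.toList cs)) with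
  | false => exact (hfalse.mp hA).symm
  | true =>
    cases hB : ((PySem.List.enumerate cs).all fun ic =>
        ((pvByFirst L).getD ic.2 []).all fun w =>
          !(PySem.Chars.startswith (cs.drop ic.1.toNat) w.toList)) with
    | false =>
      have hcontra := hfalse.mpr hB
      rw [hA] at hcontra
      exact hcontra
    | true => rfl

-- ===== VERDICT (by name: the statement is the Claim_ definition above) =====
theorem validate_diet_compliance_spec : Claim_equal_validate_diet_compliance := by
  intro md dt _
  unfold Spec_validate_diet_compliance
  simp only [validate_diet_compliance, validate_diet_compliance_alt]
  rw [avoid_eq]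
  by_cases h : (pvAvoidB.getD dt (pvAvoidB.getD "vegetarian" [])).isEmpty
  · rw [if_pos h]
    rw [List.isEmpty_iff] at h
    simp [h]
  · rw [if_neg h]
    refine List.all_congr rfl (fun slot => List.all_congr rfl (fun food => ?_))
    have := name_scan (pvAvoidB.getD dt (pvAvoidB.getD "vegetarian" []))
      (avoid_nonempty dt) (PySem.Chars.lower ((PySem.Dict.mk food).getD "name" "").toList)
    simpa [PySem.Str.isIn, PySem.Str.toList_lower] using this
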